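-- pv_equiv track=rewrite | github.com/IgorSokolovDE/Python-Algorithms | Polyakov/6014/6014.py | F
-- ===== SOURCE A (Python) =====
-- def F(k,tekHod,HodP):
--     if k==42:
--         return tekHod%2==HodP%2
--     if tekHod==HodP:
--         return False
--     else:
--         if k<42:
--            hody=[F(k+1,tekHod+1,HodP),\
--                  F(k+3,tekHod+1,HodP),\
--                  F(k+7,tekHod+1,HodP)]
--         else:
--             hody=[F(k-1,tekHod+1,HodP),\
--                  F(k-3,tekHod+1,HodP),\
--                  F(k-7,tekHod+1,HodP)]
--         if (tekHod+1)%2==HodP%2 :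
--             return any(hody)
--         else:
--             return any(hody)
-- ===== SOURCE B (Python) =====
-- def F(k, tekHod, HodP):
--     if k == 42:
--         return tekHod % 2 == HodP % 2
--     n = HodP - tekHod
--     if n <= 0:
--         return False
--     cur = {j: j == 42 for j in range(k - 7 * n, k + 7 * n + 1)}
--     for i in range(1, n + 1):
--         t = HodP - i
--         nxt = {}
--         for j in range(k - 7 * (n - i), k + 7 * (n - i) + 1):
--             if j == 42:
--                 nxt[j] = t % 2 == HodP % 2
--             else:
--                 moves = (1, 3, 7) if j < 42 else (-1, -3, -7)
--                 nxt[j] = any(cur[j + m] for m in moves)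
--         cur = nxt
--     return cur[k]
-- ===== Notes on version B (the rewrite author's own statement) =====
-- stated objective: alternative
-- what changed: Replaces A's triple-branch recursion over moves (n = HodP - tekHod levels, 3 recursive calls per node) by a bottom-up dynamic program that tabulates one dictionary of reachable positions per level from HodP down to tekHod.
-- crash fix: On inputs with k != 42 and tekHod > HodP, A recurses forever and raises RecursionError; B returns False. — e.g. on F(43, 1, 0): A raises RecursionError, B returns false
import Mathlib
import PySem

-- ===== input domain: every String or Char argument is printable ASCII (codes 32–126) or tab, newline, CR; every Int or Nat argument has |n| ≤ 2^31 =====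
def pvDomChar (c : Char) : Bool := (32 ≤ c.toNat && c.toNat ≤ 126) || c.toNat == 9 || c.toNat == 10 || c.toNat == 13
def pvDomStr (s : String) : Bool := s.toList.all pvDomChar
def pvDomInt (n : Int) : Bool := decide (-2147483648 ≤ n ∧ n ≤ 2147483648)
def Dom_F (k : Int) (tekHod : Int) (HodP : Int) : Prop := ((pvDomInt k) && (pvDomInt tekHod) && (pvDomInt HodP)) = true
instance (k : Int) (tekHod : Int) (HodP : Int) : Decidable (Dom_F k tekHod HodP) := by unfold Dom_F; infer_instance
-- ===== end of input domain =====

-- B replaces A's triple-branch recursion by a bottom-up level-by-level dynamic program over dictionaries of reachable positions (objective: alternative).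

-- ===== PORT A =====
-- A is partial (it recurses forever when k ≠ 42 and tekHod > HodP), so the port carries a
-- fuel argument; the fuel (HodP - tekHod).toNat + 1 is enough for every input in Pre_F,
-- where the Python returns.
def F_go : Nat → Int → Int → Int → Bool
  | 0, _, _, _ => false
  | fuel+1, k, tekHod, HodP =>
    if k == 42 then PySem.Int.mod tekHod 2 == PySem.Int.mod HodP 2
    else if tekHod == HodP then false
    else
      let hody :=
        if k < 42 then
          [F_go fuel (k+1) (tekHod+1) HodP, F_go fuel (k+3) (tekHod+1) HodP,
           F_go fuel (k+7) (tekHod+1) HodP]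
        else
          [F_go fuel (k-1) (tekHod+1) HodP, F_go fuel (k-3) (tekHod+1) HodP,
           F_go fuel (k-7) (tekHod+1) HodP]
      if PySem.Int.mod (tekHod+1) 2 == PySem.Int.mod HodP 2 then hody.any id
      else hody.any id

def F (k : Int) (tekHod : Int) (HodP : Int) : Bool :=
  F_go ((HodP - tekHod).toNat + 1) k tekHod HodP

-- ===== PORT B =====
-- the dict comprehension {j: j == 42 for j in range(k-7n, k+7n+1)}
def F_altInit (k : Int) (n : Int) : PySem.Dict Int Bool :=
  (PySem.List.pyRange (k - 7*n) (k + 7*n + 1) 1).foldl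
    (fun d j => d.insert j (j == 42)) PySem.Dict.empty

-- one iteration of the outer loop: builds level i (t = HodP - i) from level i-1.
-- Python reads cur[j+m] (a key always present on Pre_F inputs, proved below);
-- getD with default false is exact there.
def F_altStep (k : Int) (HodP : Int) (n : Int) (cur : PySem.Dict Int Bool) (i : Int) :
    PySem.Dict Int Bool :=
  let t := HodP - i
  (PySem.List.pyRange (k - 7*(n-i)) (k + 7*(n-i) + 1) 1).foldl
    (fun nxt j =>
      if j == 42 then
        nxt.insert j (PySem.Int.mod t 2 == PySem.Int.mod HodP 2)
      else
        nxt.insert j ((if j < 42 then [(1:Int), 3, 7] else [-1, -3, -7]).any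
          (fun m => cur.getD (j+m) false)))
    PySem.Dict.empty

def F_alt (k : Int) (tekHod : Int) (HodP : Int) : Bool :=
  if k == 42 then PySem.Int.mod tekHod 2 == PySem.Int.mod HodP 2
  else
    let n := HodP - tekHod
    if n ≤ 0 then false
    else
      ((PySem.List.pyRange 1 (n+1) 1).foldl (F_altStep k HodP n) (F_altInit k n)).getD k false

-- ===== PRECONDITION & SPEC =====
-- Pre_F excludes exactly the inputs on which Python A never returns (RecursionError):
-- k ≠ 42 together with tekHod > HodP.
def Pre_F (k : Int) (tekHod : Int) (HodP : Int) : Prop := k = 42 ∨ tekHod ≤ HodP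
instance (k : Int) (tekHod : Int) (HodP : Int) : Decidable (Pre_F k tekHod HodP) := by
  unfold Pre_F; infer_instance

def pvWitness_F : Int × Int × Int := (30, 0, 3)

-- On inputs with k ≠ 42 and tekHod > HodP, A recurses forever and raises RecursionError; B returns False.
def Raises_F (k : Int) (tekHod : Int) (HodP : Int) : Prop := k ≠ 42 ∧ HodP < tekHod
instance (k : Int) (tekHod : Int) (HodP : Int) : Decidable (Raises_F k tekHod HodP) := by
  unfold Raises_F; infer_instance
def pvRaiseWitness_F : Int × Int × Int := (43, 1, 0)
def pvRaiseWitnessOut_F : Bool := false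

def Spec_F (k : Int) (tekHod : Int) (HodP : Int) (out : Bool) : Prop := out = F_alt k tekHod HodP
instance (k : Int) (tekHod : Int) (HodP : Int) (out : Bool) : Decidable (Spec_F k tekHod HodP out) := by unfold Spec_F; infer_instance

-- ===== CLAIM (what is proved, stated in full; the proofs are below) =====
def Claim_equal_F : Prop := ∀ (k : Int) (tekHod : Int) (HodP : Int), Dom_F k tekHod HodP → Pre_F k tekHod HodP → Spec_F k tekHod HodP (F k tekHod HodP)

def Claim_raises_F : Prop := (∀ (k : Int) (tekHod : Int) (HodP : Int), Dom_F k tekHod HodP → Raises_F k tekHod HodP → ¬ Pre_F k tekHod HodP) ∧ (Dom_F (pvRaiseWitness_F.1) (pvRaiseWitness_F.2.1) (pvRaiseWitness_F.2.2) ∧ Raises_F (pvRaiseWitness_F.1) (pvRaiseWitness_F.2.1) (pvRaiseWitness_F.2.2) ∧ F_alt (pvRaiseWitness_F.1) (pvRaiseWitness_F.2.1) (pvRaiseWitness_F.2.2) = pvRaiseWitnessOut_F)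

-- ===== LEMMAS AND PROOFS =====

-- the value both programs compute at distance i below HodP (t = HodP - i), position j
def G (H : Int) : Nat → Int → Bool
  | 0, j => j == 42
  | i+1, j =>
    if j == 42 then PySem.Int.mod (H - ((i:Int)+1)) 2 == PySem.Int.mod H 2
    else ((if j < 42 then [(1:Int), 3, 7] else [-1, -3, -7]).any (fun m => G H i (j+m)))

theorem F_go_succ (fuel : Nat) (k tekHod HodP : Int) :
    F_go (fuel+1) k tekHod HodP =
      (if k == 42 then PySem.Int.mod tekHod 2 == PySem.Int.mod HodP 2
      else if tekHod == HodP then false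
      else
        let hody :=
          if k < 42 then
            [F_go fuel (k+1) (tekHod+1) HodP, F_go fuel (k+3) (tekHod+1) HodP,
             F_go fuel (k+7) (tekHod+1) HodP]
          else
            [F_go fuel (k-1) (tekHod+1) HodP, F_go fuel (k-3) (tekHod+1) HodP,
             F_go fuel (k-7) (tekHod+1) HodP]
        if PySem.Int.mod (tekHod+1) 2 == PySem.Int.mod HodP 2 then hody.any id
        else hody.any id) := rfl

theorem F_go_eq_G (H : Int) : ∀ (i : Nat) (k : Int), F_go (i+1) k (H - (i:Int)) H = G H i k := by
  intro i
  induction i with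
  | zero =>
    intro k
    by_cases h : k = 42 <;> simp [F_go, G, h]
  | succ i ih =>
    intro k
    have ht : ¬ (H - ((i:Int)+1) = H) := by omega
    have hc : ((i+1:Nat):Int) = (i:Int)+1 := by push_cast; ring
    have hstep : H - ((i:Int)+1) + 1 = H - (i:Int) := by ring
    rw [F_go_succ, hc, hstep]
    simp only [ih]
    by_cases h : k = 42
    · simp [G, h]
    · by_cases hlt : k < 42 <;>
        simp [G, h, hlt, ite_self, sub_eq_add_neg] <;> (intro _; omega)

theorem F_eq_G (k tekHod HodP : Int) (h : tekHod ≤ HodP) :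
    F k tekHod HodP = G HodP (HodP - tekHod).toNat k := by
  have hi : HodP - (((HodP - tekHod).toNat : Int)) = tekHod := by omega
  have := F_go_eq_G HodP (HodP - tekHod).toNat k
  rw [hi] at this
  exact this

theorem foldl_insert_get? (v : Int → Bool) (l : List Int) (d : PySem.Dict Int Bool) (j : Int) :
    (l.foldl (fun d x => d.insert x (v x)) d).get? j
      = if j ∈ l then some (v j) else d.get? j := by
  induction l generalizing d with
  | nil => simp
  | cons x xs ih =>
    simp only [List.foldl_cons, ih, List.mem_cons]
    by_cases hx : j ∈ xs
    · simp [hx]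
    · by_cases hj : j = x
      · simp [hj, PySem.Dict.get?_insert_self]
      · simp [hx, hj, PySem.Dict.get?_insert_of_ne]

-- the value F_altStep stores at key j
def stepVal (t H : Int) (cur : PySem.Dict Int Bool) (j : Int) : Bool :=
  if j == 42 then PySem.Int.mod t 2 == PySem.Int.mod H 2
  else ((if j < 42 then [(1:Int), 3, 7] else [-1, -3, -7]).any (fun m => cur.getD (j+m) false))

theorem get?_init (k n j : Int) :
    (F_altInit k n).get? j
      = if k - 7*n ≤ j ∧ j < k + 7*n + 1 then some (j == 42) else none := by
  unfold F_altInit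
  rw [foldl_insert_get? (fun x => x == 42)]
  simp [PySem.List.mem_pyRange_one]

theorem get?_step (k H n i j : Int) (cur : PySem.Dict Int Bool) :
    (F_altStep k H n cur i).get? j
      = if k - 7*(n-i) ≤ j ∧ j < k + 7*(n-i) + 1 then some (stepVal (H - i) H cur j)
        else none := by
  simp only [F_altStep]
  have hfun : (fun (nxt : PySem.Dict Int Bool) (j : Int) =>
      if j == 42 then nxt.insert j (PySem.Int.mod (H - i) 2 == PySem.Int.mod H 2)
      else nxt.insert j ((if j < 42 then [(1:Int), 3, 7] else [-1, -3, -7]).any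
        (fun m => cur.getD (j+m) false)))
      = fun nxt j => nxt.insert j (stepVal (H - i) H cur j) := by
    funext nxt j
    by_cases h : j = 42 <;> simp [stepVal, h]
  rw [hfun, foldl_insert_get? (stepVal (H - i) H cur)]
  simp [PySem.List.mem_pyRange_one]

theorem alt_inv (H k : Int) (N : Nat) :
    ∀ (m : Nat), m ≤ N → ∀ j, k - 7*((N:Int) - (m:Int)) ≤ j → j < k + 7*((N:Int) - (m:Int)) + 1 →
      ((PySem.List.pyRange 1 ((m:Int)+1) 1).foldl (F_altStep k H (N:Int)) (F_altInit k (N:Int))).get? j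
        = some (G H m j) := by
  intro m
  induction m with
  | zero =>
    intro _ j h1 h2
    rw [PySem.List.pyRange_one_eq_nil (by omega)]
    simp only [List.foldl_nil]
    rw [get?_init]
    simp only [Int.natCast_zero, sub_zero] at h1 h2
    rw [if_pos ⟨h1, h2⟩]
    simp [G]
  | succ m ih =>
    intro hm j h1 h2
    have hsplit : PySem.List.pyRange 1 (((m+1:Nat):Int)+1) 1
        = PySem.List.pyRange 1 ((m:Int)+1) 1 ++ [(m:Int)+1] := by
      have : (((m+1:Nat):Int)+1) = ((m:Int)+1) + 1 := by push_cast; ring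
      rw [this, PySem.List.pyRange_one_succ_right (by omega)]
    rw [hsplit, List.foldl_append]
    simp only [List.foldl_cons, List.foldl_nil]
    rw [get?_step]
    have hc : ((m+1:Nat):Int) = (m:Int)+1 := by push_cast; ring
    rw [hc] at h1 h2
    rw [if_pos ⟨by omega, by omega⟩]
    congr 1
    -- stepVal at level m+1 agrees with G H (m+1) j
    have hget : ∀ (d : Int), -7 ≤ d → d ≤ 7 →
        ((PySem.List.pyRange 1 ((m:Int)+1) 1).foldl (F_altStep k H (N:Int)) (F_altInit k (N:Int))).getD (j+d) false
          = G H m (j+d) := by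
      intro d hd1 hd2
      rw [PySem.Dict.getD_eq_get?_getD, ih (by omega) (j+d) (by omega) (by omega)]
      rfl
    by_cases h42 : j = 42
    · have : H - ((m:Int)+1) - 0 = H - ((m:Int)+1) := by ring
      simp [stepVal, G, h42]
    · by_cases hlt : j < 42 <;>
        simp [stepVal, G, h42, hlt, List.any,
          hget 1 (by omega) (by omega), hget 3 (by omega) (by omega),
          hget 7 (by omega) (by omega), hget (-1) (by omega) (by omega),
          hget (-3) (by omega) (by omega), hget (-7) (by omega) (by omega)]

-- ===== VERDICT (by name: the statement is the Claim_ definition above) =====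
theorem F_spec : Claim_equal_F := by
  intro k tekHod HodP _ hpre
  show F k tekHod HodP = F_alt k tekHod HodP
  by_cases h42 : k = 42
  · simp [F, F_go, F_alt, h42]
  · have ht : tekHod ≤ HodP := hpre.resolve_left h42
    rcases lt_or_eq_of_le ht with hlt | heq
    · -- tekHod < HodP : both sides compute G HodP N k with N = (HodP - tekHod).toNat ≥ 1
      set N : Nat := (HodP - tekHod).toNat with hN
      have hn : HodP - tekHod = (N:Int) := by omega
      have hA : F k tekHod HodP = G HodP N k := F_eq_G k tekHod HodP ht
      have hB : F_alt k tekHod HodP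
          = ((PySem.List.pyRange 1 ((N:Int)+1) 1).foldl (F_altStep k HodP (N:Int))
              (F_altInit k (N:Int))).getD k false := by
        unfold F_alt
        rw [if_neg (by simp [h42])]
        simp only [hn]
        rw [if_neg (by omega)]
      have hinv := alt_inv HodP k N N (le_refl N) k (by omega) (by omega)
      rw [hA, hB, PySem.Dict.getD_eq_get?_getD, hinv]
      rfl
    · -- tekHod = HodP : A returns False at the tekHod == HodP check, B at n ≤ 0
      have h0 : (HodP - tekHod).toNat = 0 := by omega
      simp [F, F_go, F_alt, h42, heq]

@[simp] theorem F_raises : Claim_raises_F := by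
  unfold Claim_raises_F
  constructor
  · intro k tekHod HodP _ hr hpre
    rcases hpre with h | h
    · exact hr.1 h
    · exact (not_le.mpr hr.2) h
  · exact ⟨by decide, by decide, by decide⟩
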